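-- pv_equiv track=rewrite | github.com/CamBrown00/CB-Final-Project-MPL | computeSampleStats.py | getFrequencyLists
-- ===== SOURCE A (Python) =====
-- def getFrequencyLists(data):
--     # Return lists containing frequencies of values, and each unique value
--     values = []
--     frequencyList = []
--     for value in data:
--         if not(value in values):
--             values.append(value)
--             frequencyList.append(1)
--         else:
--             frequencyList[values.index(value)]+= 1
--     return frequencyList, values
-- ===== SOURCE B (Python) =====
-- def getFrequencyLists(data):
--     # Two staged passes: first dedup into first-appearance order, then count each unique value.
--     values = []
--     for value in data:
--         if value not in values:
--             values.append(value)
--     frequencyList = [data.count(value) for value in values]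
--     return frequencyList, values
-- ===== Notes on version B (the rewrite author's own statement) =====
-- stated objective: alternative
-- what changed: Splits A's single loop that incrementally maintains parallel values/frequency lists (with list.index updates) into two staged passes: a dedup pass building the ordered unique values, then a separate per-unique-value data.count pass producing the frequencies.
import Mathlib
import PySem

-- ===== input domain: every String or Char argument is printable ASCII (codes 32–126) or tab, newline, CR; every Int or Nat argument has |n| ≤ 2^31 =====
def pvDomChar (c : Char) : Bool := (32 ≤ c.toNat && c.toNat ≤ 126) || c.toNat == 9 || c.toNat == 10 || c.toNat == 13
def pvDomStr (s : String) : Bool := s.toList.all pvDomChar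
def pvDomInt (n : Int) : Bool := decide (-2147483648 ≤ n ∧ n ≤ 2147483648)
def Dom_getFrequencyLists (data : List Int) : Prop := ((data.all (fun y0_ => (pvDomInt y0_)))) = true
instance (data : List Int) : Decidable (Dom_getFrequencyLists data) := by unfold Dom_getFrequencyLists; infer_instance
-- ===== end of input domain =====

-- B splits A's single incremental-counting loop into two staged passes: dedup into first-appearance order, then count each unique value; alternative decomposition, same cost.


-- ===== PORT A =====
-- one loop over data maintaining (values, frequencyList); frequencyList[values.index(value)] += 1
-- the index is always in range (value ∈ values on that branch), so getD 0 is exact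
def getFrequencyLists (data : List Int) : List Int × List Int :=
  let s := data.foldl
    (fun (s : List Int × List Int) (value : Int) =>
      if value ∈ s.1 then
        (s.1, s.2.set (s.1.idxOf value) (s.2.getD (s.1.idxOf value) 0 + 1))
      else
        (s.1 ++ [value], s.2 ++ [1]))
    ([], [])
  (s.2, s.1)

-- ===== PORT B =====
-- pass 1: dedup loop building values in first-appearance order;
-- pass 2: frequencyList = [data.count(v) for v in values]
def getFrequencyLists_alt (data : List Int) : List Int × List Int :=
  let values := data.foldl (fun vs v => if v ∈ vs then vs else vs ++ [v]) []
  (values.map (fun v => (data.count v : Int)), values)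

-- ===== PRECONDITION & SPEC =====
def Spec_getFrequencyLists (data : List Int) (out : List Int × List Int) : Prop := out = getFrequencyLists_alt data
instance (data : List Int) (out : List Int × List Int) : Decidable (Spec_getFrequencyLists data out) := by unfold Spec_getFrequencyLists; infer_instance

-- ===== CLAIM (what is proved, stated in full; the proofs are below) =====
def Claim_equal_getFrequencyLists : Prop := ∀ (data : List Int), Dom_getFrequencyLists data → Spec_getFrequencyLists data (getFrequencyLists data)

-- ===== LEMMAS AND PROOFS =====

-- updating the idxOf-slot of a mapped nodup list = mapping a pointwise-updated function
lemma set_idxOf_map {vs : List Int} (c : Int → Int) (x : Int)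
    (hnd : vs.Nodup) (hx : x ∈ vs) :
    (vs.map c).set (vs.idxOf x) ((vs.map c).getD (vs.idxOf x) 0 + 1)
      = vs.map (fun v => if v = x then c v + 1 else c v) := by
  induction vs with
  | nil => cases hx
  | cons y t ih =>
    rcases List.nodup_cons.mp hnd with ⟨hy, hndt⟩
    by_cases hyx : y = x
    · subst hyx
      simp only [List.idxOf_cons_self, List.map_cons, List.set, List.getD,
        List.getElem?_cons_zero, Option.getD_some]
      have key : ∀ a ∈ t, (if a = y then c a + 1 else c a) = c a := fun a ha => by
        simp [show a ≠ y from fun h => hy (h ▸ ha)]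
      rw [List.map_congr_left key]
      simp
    · have hxt : x ∈ t := by cases hx with
        | head => exact absurd rfl hyx
        | tail _ h => exact h
      have hne : (y == x) = false := by simp [hyx]
      simp only [List.map_cons, List.idxOf_cons, hne, cond_false, List.set, List.getD,
        List.getElem?_cons_succ]
      rw [if_neg hyx]
      congr 1
      simpa [List.getD] using ih hndt hxt

-- main invariant: A's loop, started at (vs, vs.map c) with c vanishing off vs and vs nodup,
-- lands at the dedup extension of vs with counts incremented by occurrences in the rest
lemma loop_inv (rest : List Int) (vs : List Int) (c : Int → Int)
    (hnd : vs.Nodup) (hc : ∀ v, v ∉ vs → c v = 0) :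
    rest.foldl
      (fun (s : List Int × List Int) (value : Int) =>
        if value ∈ s.1 then
          (s.1, s.2.set (s.1.idxOf value) (s.2.getD (s.1.idxOf value) 0 + 1))
        else
          (s.1 ++ [value], s.2 ++ [1]))
      (vs, vs.map c)
    = (let vs' := rest.foldl (fun vs v => if v ∈ vs then vs else vs ++ [v]) vs
       (vs', vs'.map (fun v => c v + (rest.count v : Int)))) := by
  induction rest generalizing vs c with
  | nil => simp
  | cons x t ih =>
    simp only [List.foldl_cons]
    by_cases hx : x ∈ vs
    · rw [if_pos hx, if_pos hx]
      rw [show ((vs, vs.map c).1, ((vs, vs.map c).2).set (((vs, vs.map c).1).idxOf x)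
            (((vs, vs.map c).2).getD (((vs, vs.map c).1).idxOf x) 0 + 1))
          = (vs, (vs.map c).set (vs.idxOf x) ((vs.map c).getD (vs.idxOf x) 0 + 1)) from rfl]
      rw [set_idxOf_map c x hnd hx]
      rw [ih vs (fun v => if v = x then c v + 1 else c v) hnd
        (fun v hv => by
          have : v ≠ x := fun h => (h ▸ hv) hx
          simp [this, hc v hv])]
      simp only
      congr 2
      funext v
      by_cases hvx : v = x
      · subst hvx
        simp [List.count_cons_self]
        ring
      · have hxv : ¬ x = v := fun h => hvx h.symm
        simp [hvx, hxv]
    · rw [if_neg hx, if_neg hx]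
      have hmap : vs.map c ++ [1] = (vs ++ [x]).map (fun v => if v = x then 1 else c v) := by
        rw [List.map_append]
        congr 1
        · exact (List.map_congr_left (fun v hv => by
            have : v ≠ x := fun h => hx (h ▸ hv)
            simp [this])).symm
        · simp
      rw [hmap]
      rw [ih (vs ++ [x]) (fun v => if v = x then 1 else c v)
        (by simp [List.nodup_append, hnd]
            exact fun a ha h' => hx (h' ▸ ha))
        (fun v hv => by
          have h1 : v ∉ vs := fun h => hv (List.mem_append_left _ h)
          have h2 : v ≠ x := fun h => hv (h ▸ List.mem_append_right _ (List.mem_singleton.mpr rfl))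
          simp [h2, hc v h1])]
      simp only
      congr 2
      funext v
      by_cases hvx : v = x
      · subst hvx
        simp [List.count_cons_self, hc v hx]
        ring
      · have hxv : ¬ x = v := fun h => hvx h.symm
        simp [hvx, hxv]

-- ===== VERDICT (by name: the statement is the Claim_ definition above) =====
theorem getFrequencyLists_spec : Claim_equal_getFrequencyLists := by
  intro data _
  unfold Spec_getFrequencyLists getFrequencyLists getFrequencyLists_alt
  have h := loop_inv data [] (fun _ => 0) List.nodup_nil (fun _ _ => rfl)
  simp only [List.map_nil] at h
  rw [h]
  simp
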